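-- pv_equiv track=rewrite | github.com/prism-iq/gaia-protocol | ear/delta.py | recurse
-- ===== SOURCE A (Python) =====
-- def recurse(items, depth=0):
--     """simplifie récursivement"""
--     if depth > 5 or len(items) <= 3:
--         return items
--
--     # fusionne paires similaires
--     merged = []
--     skip = set()
--
--     for i, a in enumerate(items):
--         if i in skip:
--             continue
--         found = False
--         for j, b in enumerate(items[i+1:], i+1):
--             if j in skip:
--                 continue
--             # si même longueur ± 2, fusionner
--             if abs(len(a) - len(b)) <= 2:
--                 merged.append(a if len(a) <= len(b) else b)
--                 skip.add(i)
--                 skip.add(j)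
--                 found = True
--                 break
--         if not found and i not in skip:
--             merged.append(a)
--
--     if merged != items:
--         return recurse(merged, depth + 1)
--     return items
-- ===== SOURCE B (Python) =====
-- def _merge_pass(items):
--     # one pass: per-length buckets of indices (ascending) with consumption pointers;
--     # each item pairs with the minimum unconsumed index of similar (+-2) length.
--     lens = [len(s) for s in items]
--     buckets = {}
--     for i, L in enumerate(lens):
--         buckets.setdefault(L, []).append(i)
--     ptr = {L: 0 for L in buckets}
--     merged = []
--     for i, a in enumerate(items):
--         La = lens[i]
--         bkt = buckets[La]
--         p = ptr[La]
--         if p < len(bkt) and bkt[p] == i: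
--             ptr[La] = p + 1  # consume i itself
--             best = None
--             best_len = None
--             for L in range(La - 2, La + 3):
--                 if L in buckets:
--                     q = ptr[L]
--                     b = buckets[L]
--                     if q < len(b) and (best is None or b[q] < best):
--                         best = b[q]
--                         best_len = L
--             if best is None:
--                 merged.append(a)
--             else:
--                 ptr[best_len] += 1  # consume the partner
--                 merged.append(a if La <= best_len else items[best])
--         # else: i was already consumed as an earlier item's partner
--     return merged
--
--
-- def recurse(items, depth=0):
--     """simplifie récursivement"""
--     if depth > 5 or len(items) <= 3:
--         return items
--     merged = _merge_pass(items)
--     if merged != items: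
--         return recurse(merged, depth + 1)
--     return items
-- ===== Notes on version B (the rewrite author's own statement) =====
-- stated objective: alternative
-- what changed: A's inner rescan over items[i+1:] for each item is replaced by per-length buckets of ascending indices with consumption pointers, so each item finds its minimum-index similar (length ±2) partner by peeking five buckets instead of rescanning the remaining items.
import Mathlib
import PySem

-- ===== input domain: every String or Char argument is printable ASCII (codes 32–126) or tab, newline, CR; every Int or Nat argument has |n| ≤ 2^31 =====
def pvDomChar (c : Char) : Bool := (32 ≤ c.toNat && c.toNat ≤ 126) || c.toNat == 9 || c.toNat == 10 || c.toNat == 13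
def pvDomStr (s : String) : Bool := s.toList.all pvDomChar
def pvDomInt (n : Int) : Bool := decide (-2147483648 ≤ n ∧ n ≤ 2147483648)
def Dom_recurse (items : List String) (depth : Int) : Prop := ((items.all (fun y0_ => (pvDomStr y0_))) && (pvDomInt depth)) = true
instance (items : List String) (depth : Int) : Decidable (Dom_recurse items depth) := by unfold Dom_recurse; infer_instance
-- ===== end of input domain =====

-- B replaces A's inner rescan of the remaining items by per-length buckets of ascending
-- indices with consumption pointers: each pass pairs every item with the minimum unconsumed
-- index of similar (±2) length by peeking five buckets (objective: alternative).

-- ===== PORT A =====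

def slen (s : String) : Int := PySem.Str.len s

def findSim (la : Int) (skip : PySem.Set Int) : List (Int × String) → Option (Int × String)
  | [] => none
  | (j, b) :: rest =>
    if skip.contains j then findSim la skip rest
    else if (la - slen b).natAbs ≤ 2 then some (j, b)
    else findSim la skip rest

def mergeLoopA : List (Int × String) → List String → PySem.Set Int → List String
  | [], merged, _ => merged
  | (i, a) :: rest, merged, skip =>
    if skip.contains i then mergeLoopA rest merged skip
    else
      match findSim (slen a) skip rest with
      | some (j, b) =>
        mergeLoopA rest (merged ++ [if slen a ≤ slen b then a else b]) ((skip.add i).add j)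
      | none =>
        if skip.contains i then mergeLoopA rest merged skip
        else mergeLoopA rest (merged ++ [a]) skip

def recurse (items : List String) (depth : Int) : List String :=
  if depth > 5 ∨ PySem.List.len items ≤ 3 then items
  else
    let merged := mergeLoopA (PySem.List.enumerate items 0) [] PySem.Set.empty
    if merged ≠ items then recurse merged (depth + 1) else items
termination_by (6 - depth).toNat
decreasing_by
  simp only [not_or, not_lt, PySem.List.len_eq] at *
  omega

-- ===== PORT B =====

def buildBuckets (lens : List Int) : PySem.Dict Int (List Int) :=
  (PySem.List.enumerate lens 0).foldl (fun d p => d.modify p.2 [] (· ++ [p.1])) PySem.Dict.empty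

def initPtr (buckets : PySem.Dict Int (List Int)) : PySem.Dict Int Nat :=
  buckets.keys.foldl (fun d L => d.insert L 0) PySem.Dict.empty

def bucketQuery (buckets : PySem.Dict Int (List Int)) (ptr : PySem.Dict Int Nat) (la : Int) :
    Option (Int × Int) :=
  (PySem.List.pyRange (la - 2) (la + 3) 1).foldl
    (fun best L =>
      if buckets.contains L then
        let b := buckets.getD L []
        let q := ptr.getD L 0
        if q < b.length then
          match best with
          | none => some (b.getD q 0, L)
          | some (bi, _) => if b.getD q 0 < bi then some (b.getD q 0, L) else best
        else best
      else best) none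

def mergeLoopB (items : List String) :
    List (Int × String) → List String → PySem.Dict Int (List Int) → PySem.Dict Int Nat → List String
  | [], merged, _, _ => merged
  | (i, a) :: rest, merged, buckets, ptr =>
    let la := slen a
    let bkt := buckets.getD la []
    let p := ptr.getD la 0
    if p < bkt.length ∧ bkt.getD p 0 = i then
      let ptr1 := ptr.insert la (p + 1)
      match bucketQuery buckets ptr1 la with
      | none => mergeLoopB items rest (merged ++ [a]) buckets ptr1
      | some (best, bestL) =>
        mergeLoopB items rest
          (merged ++ [if la ≤ bestL then a else PySem.List.pyGetD items best ""])
          buckets (ptr1.insert bestL (ptr1.getD bestL 0 + 1))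
    else mergeLoopB items rest merged buckets ptr

def mergePass (items : List String) : List String :=
  let lens := items.map slen
  let buckets := buildBuckets lens
  mergeLoopB items (PySem.List.enumerate items 0) [] buckets (initPtr buckets)

def recurse_alt (items : List String) (depth : Int) : List String :=
  if depth > 5 ∨ PySem.List.len items ≤ 3 then items
  else
    let merged := mergePass items
    if merged ≠ items then recurse_alt merged (depth + 1) else items
termination_by (6 - depth).toNat
decreasing_by
  simp only [not_or, not_lt, PySem.List.len_eq] at *
  omega

-- ===== PRECONDITION & SPEC =====
def Spec_recurse (items : List String) (depth : Int) (out : List String) : Prop := out = recurse_alt items depth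
instance (items : List String) (depth : Int) (out : List String) : Decidable (Spec_recurse items depth out) := by unfold Spec_recurse; infer_instance

-- ===== CLAIM (what is proved, stated in full; the proofs are below) =====
def Claim_equal_recurse : Prop := ∀ (items : List String) (depth : Int), Dom_recurse items depth → Spec_recurse items depth (recurse items depth)

-- ===== LEMMAS AND PROOFS =====

def avail (skip : PySem.Set Int) (todo : List (Int × String)) (L : Int) : List Int :=
  (todo.filter (fun p => !(skip.contains p.1) && (slen p.2 == L))).map (·.1)

-- cons unfolding of avail

theorem avail_cons (skip : PySem.Set Int) (i : Int) (a : String) (rest : List (Int × String)) (L : Int) :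
    avail skip ((i, a) :: rest) L =
      if skip.contains i = false ∧ slen a = L then i :: avail skip rest L else avail skip rest L := by
  by_cases h1 : i ∈ skip
  · simp [avail, List.filter_cons, PySem.Set.contains_iff, h1]
  · by_cases h2 : slen a = L
    · simp [avail, List.filter_cons, PySem.Set.contains_iff, h1, h2]
    · simp [avail, List.filter_cons, PySem.Set.contains_iff, h1, h2]

theorem mem_avail (skip : PySem.Set Int) (todo : List (Int × String)) (L c : Int) :
    c ∈ avail skip todo L ↔ ∃ p ∈ todo, p.1 = c ∧ skip.contains p.1 = false ∧ slen p.2 = L := by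
  simp only [avail, List.mem_map, List.mem_filter, Bool.and_eq_true, Bool.not_eq_true',
    beq_iff_eq]
  constructor
  · rintro ⟨p, ⟨hp, hc, hl⟩, rfl⟩
    exact ⟨p, hp, rfl, hc, hl⟩
  · rintro ⟨p, hp, rfl, hc, hl⟩
    exact ⟨p, ⟨hp, hc, hl⟩, rfl⟩

theorem avail_pairwise (skip : PySem.Set Int) (todo : List (Int × String)) (L : Int)
    (hpw : todo.Pairwise (fun p q => p.1 < q.1)) : (avail skip todo L).Pairwise (· < ·) := by
  unfold avail
  exact List.pairwise_map.mpr ((hpw.filter _))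

theorem pairwise_fst_inj (l : List (Int × String))
    (hpw : l.Pairwise (fun p q => p.1 < q.1)) :
    ∀ p ∈ l, ∀ q ∈ l, p.1 = q.1 → p = q := by
  induction l with
  | nil => simp
  | cons a rest ih =>
    rcases List.pairwise_cons.mp hpw with ⟨ha, hrest⟩
    intro p hp q hq hpq
    rcases List.mem_cons.mp hp with hpa | hp' <;> rcases List.mem_cons.mp hq with hqa | hq'
    · rw [hpa, hqa]
    · exact absurd hpq (by rw [hpa]; have := ha q hq'; omega)
    · exact absurd hpq (by rw [hqa]; have := ha p hp'; omega)
    · exact ih hrest p hp' q hq' hpq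

-- skip.add i |>.add j seen through avail

theorem avail_add_add (skip : PySem.Set Int) (i j : Int) (rest : List (Int × String)) (L : Int)
    (hi : ∀ p ∈ rest, i < p.1) :
    avail ((skip.add i).add j) rest L = (avail skip rest L).filter (fun c => !(c == j)) := by
  unfold avail
  rw [List.filter_map]
  congr 1
  rw [List.filter_filter]
  apply List.filter_congr
  intro p hp
  have hpi : p.1 ≠ i := by have := hi p hp; omega
  by_cases hc : p.1 ∈ skip <;> by_cases hj : p.1 = j <;>
    simp [PySem.Set.contains_iff, PySem.Set.mem_add, hc, hj, hpi, Function.comp]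

def stepB (buckets : PySem.Dict Int (List Int)) (ptr : PySem.Dict Int Nat)
    (best : Option (Int × Int)) (L : Int) : Option (Int × Int) :=
  if buckets.contains L then
    let b := buckets.getD L []
    let q := ptr.getD L 0
    if q < b.length then
      match best with
      | none => some (b.getD q 0, L)
      | some (bi, _) => if b.getD q 0 < bi then some (b.getD q 0, L) else best
    else best
  else best

def semCand (buckets : PySem.Dict Int (List Int)) (ptr : PySem.Dict Int Nat) (L : Int) : Option Int :=
  ((buckets.getD L []).drop (ptr.getD L 0)).head?

theorem stepB_eq (buckets : PySem.Dict Int (List Int)) (ptr : PySem.Dict Int Nat)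
    (best : Option (Int × Int)) (L : Int) :
    stepB buckets ptr best L =
      match semCand buckets ptr L with
      | none => best
      | some c =>
        match best with
        | none => some (c, L)
        | some (bi, _) => if c < bi then some (c, L) else best := by
  unfold stepB semCand
  by_cases hc : buckets.contains L
  · rw [if_pos hc]
    set b := buckets.getD L [] with hb
    set q := ptr.getD L 0 with hq
    by_cases hlt : q < b.length
    · rw [if_pos hlt, List.head?_drop, List.getElem?_eq_getElem hlt]
      have : b.getD q 0 = b[q] := List.getD_eq_getElem b 0 hlt
      rw [this]
    · rw [if_neg hlt, List.head?_drop, List.getElem?_eq_none (by omega)]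
  · have hcf : buckets.contains L = false := by simpa using hc
    rw [if_neg hc, PySem.Dict.getD_of_not_contains buckets _ hcf]
    simp

theorem stepB_none (buckets : PySem.Dict Int (List Int)) (ptr : PySem.Dict Int Nat)
    (best : Option (Int × Int)) (L : Int) (h : semCand buckets ptr L = none) :
    stepB buckets ptr best L = best := by
  rw [stepB_eq, h]

theorem stepB_some_none (buckets : PySem.Dict Int (List Int)) (ptr : PySem.Dict Int Nat)
    (L c : Int) (h : semCand buckets ptr L = some c) :
    stepB buckets ptr none L = some (c, L) := by
  rw [stepB_eq, h]

theorem stepB_some_some (buckets : PySem.Dict Int (List Int)) (ptr : PySem.Dict Int Nat)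
    (L c bi L' : Int) (h : semCand buckets ptr L = some c) :
    stepB buckets ptr (some (bi, L')) L = if c < bi then some (c, L) else some (bi, L') := by
  rw [stepB_eq, h]

theorem fold_none (buckets : PySem.Dict Int (List Int)) (ptr : PySem.Dict Int Nat)
    (Ls : List Int) (acc : Option (Int × Int))
    (h : ∀ L ∈ Ls, semCand buckets ptr L = none) :
    Ls.foldl (stepB buckets ptr) acc = acc := by
  induction Ls generalizing acc with
  | nil => rfl
  | cons L Ls ih =>
    rw [List.foldl_cons, stepB_eq, h L (by simp)]
    exact ih _ (fun L' hL' => h L' (by simp [hL']))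

theorem fold_sel (buckets : PySem.Dict Int (List Int)) (ptr : PySem.Dict Int Nat)
    (j Lb : Int) (Ls : List Int)
    (hLb : semCand buckets ptr Lb = some j)
    (hmin : ∀ L ∈ Ls, ∀ c, semCand buckets ptr L = some c → j ≤ c ∧ (c = j → L = Lb)) :
    ∀ acc, ((acc = none ∨ ∃ c L', j < c ∧ acc = some (c, L')) ∧ Lb ∈ Ls) ∨ acc = some (j, Lb) →
    Ls.foldl (stepB buckets ptr) acc = some (j, Lb) := by
  induction Ls with
  | nil =>
    intro acc hacc
    rcases hacc with ⟨_, hmem⟩ | rfl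
    · simp at hmem
    · rfl
  | cons L Ls ih =>
    intro acc hacc
    rw [List.foldl_cons]
    have hmin' : ∀ L' ∈ Ls, ∀ c, semCand buckets ptr L' = some c → j ≤ c ∧ (c = j → L' = Lb) :=
      fun L' hL' => hmin L' (by simp [hL'])
    rcases hacc with ⟨hst, hmem⟩ | rfl
    · by_cases hLLb : L = Lb
      · subst hLLb
        rcases hst with rfl | ⟨c, L', hjc, rfl⟩
        · rw [stepB_some_none _ _ _ _ hLb]
          exact ih hmin' _ (Or.inr rfl)
        · rw [stepB_some_some _ _ _ _ _ _ hLb, if_pos hjc]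
          exact ih hmin' _ (Or.inr rfl)
      · have hmem' : Lb ∈ Ls := by
          rcases List.mem_cons.mp hmem with h | h
          · exact absurd h.symm hLLb
          · exact h
        cases hcand : semCand buckets ptr L with
        | none =>
          rw [stepB_none _ _ _ _ hcand]
          exact ih hmin' _ (Or.inl ⟨hst, hmem'⟩)
        | some c =>
          have ⟨hjc, hcj⟩ := hmin L (by simp) c hcand
          have hjc' : j < c := by
            rcases lt_or_eq_of_le hjc with h | h
            · exact h
            · exact absurd (hcj h.symm) hLLb
          rcases hst with rfl | ⟨c0, L0, hjc0, rfl⟩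
          · rw [stepB_some_none _ _ _ _ hcand]
            exact ih hmin' _ (Or.inl ⟨Or.inr ⟨c, L, hjc', rfl⟩, hmem'⟩)
          · rw [stepB_some_some _ _ _ _ _ _ hcand]
            by_cases hlt : c < c0
            · rw [if_pos hlt]
              exact ih hmin' _ (Or.inl ⟨Or.inr ⟨c, L, hjc', rfl⟩, hmem'⟩)
            · rw [if_neg hlt]
              exact ih hmin' _ (Or.inl ⟨Or.inr ⟨c0, L0, hjc0, rfl⟩, hmem'⟩)
    · cases hcand : semCand buckets ptr L with
      | none =>
        rw [stepB_none _ _ _ _ hcand]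
        exact ih hmin' _ (Or.inr rfl)
      | some c =>
        have ⟨hjc, _⟩ := hmin L (by simp) c hcand
        rw [stepB_some_some _ _ _ _ _ _ hcand, if_neg (by omega)]
        exact ih hmin' _ (Or.inr rfl)

theorem findSim_eq_find (la : Int) (skip : PySem.Set Int) (l : List (Int × String)) :
    findSim la skip l =
      l.find? (fun p => !(skip.contains p.1) && decide ((la - slen p.2).natAbs ≤ 2)) := by
  induction l with
  | nil => rfl
  | cons p rest ih =>
    obtain ⟨j, b⟩ := p
    by_cases h1 : j ∈ skip
    · simp [findSim, PySem.Set.contains_iff, h1, ih]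
    · by_cases h2 : (la - slen b).natAbs ≤ 2
      · simp [findSim, PySem.Set.contains_iff, h1, h2]
      · simp [findSim, PySem.Set.contains_iff, h1, h2, ih]

theorem find?_strengthen {α : Type} (l : List α) (P P' : α → Bool) (x : α)
    (h : l.find? P = some x) (hx : P' x = true)
    (himp : ∀ p, P' p = true → P p = true) :
    l.find? P' = some x := by
  induction l with
  | nil => simp at h
  | cons a rest ih =>
    by_cases hP : P a
    · rw [List.find?_cons_of_pos hP] at h
      cases h
      rw [List.find?_cons_of_pos hx]
    · have hP' : P' a = false := by
        by_contra hc
        exact hP (himp a (by simpa using hc))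
      rw [List.find?_cons_of_neg (by simp [hP])] at h
      rw [List.find?_cons_of_neg (by simp [hP'])]
      exact ih h

theorem find?_min {α β : Type} [Preorder α] (l : List (α × β))
    (hpw : l.Pairwise (fun p q => p.1 < q.1)) (P : α × β → Bool) (x : α × β)
    (h : l.find? P = some x) : ∀ p ∈ l, P p = true → x.1 ≤ p.1 := by
  induction l with
  | nil => simp at h
  | cons a rest ih =>
    intro p hp hPp
    rcases List.pairwise_cons.mp hpw with ⟨ha, hrest⟩
    by_cases hPa : P a
    · rw [List.find?_cons_of_pos hPa] at h
      cases h
      rcases List.mem_cons.mp hp with rfl | hp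
      · exact le_refl _
      · exact le_of_lt (ha p hp)
    · rw [List.find?_cons_of_neg (by simp [hPa])] at h
      rcases List.mem_cons.mp hp with rfl | hp
      · exact absurd hPp (by simp [hPa])
      · exact ih hrest h p hp hPp

theorem bucketQuery_eq_foldl (buckets : PySem.Dict Int (List Int)) (ptr : PySem.Dict Int Nat) (la : Int) :
    bucketQuery buckets ptr la = (PySem.List.pyRange (la - 2) (la + 3) 1).foldl (stepB buckets ptr) none := rfl

theorem loop_eq (items : List String) (todo : List (Int × String)) (merged : List String)
    (skip : PySem.Set Int) (buckets : PySem.Dict Int (List Int)) (ptr : PySem.Dict Int Nat)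
    (Hget : ∀ p ∈ todo, PySem.List.pyGetD items p.1 "" = p.2)
    (Hpw : todo.Pairwise (fun p q => p.1 < q.1))
    (Hinv : ∀ L, (buckets.getD L []).drop (ptr.getD L 0) = avail skip todo L) :
    mergeLoopA todo merged skip = mergeLoopB items todo merged buckets ptr := by
  induction todo generalizing merged skip buckets ptr with
  | nil => rfl
  | cons hd rest ih =>
    obtain ⟨i, a⟩ := hd
    have hi_lt : ∀ p ∈ rest, i < p.1 := (List.pairwise_cons.mp Hpw).1
    have hpw' : rest.Pairwise (fun p q => p.1 < q.1) := (List.pairwise_cons.mp Hpw).2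
    have Hget' : ∀ p ∈ rest, PySem.List.pyGetD items p.1 "" = p.2 :=
      fun p hp => Hget p (List.mem_cons_of_mem _ hp)
    -- the B-side guard tests exactly 'i has not been consumed', i.e. 'i ∉ skip'
    have hBcond : (ptr.getD (slen a) 0 < (buckets.getD (slen a) []).length ∧
        (buckets.getD (slen a) []).getD (ptr.getD (slen a) 0) 0 = i) ↔ skip.contains i = false := by
      have hhd : ((buckets.getD (slen a) []).drop (ptr.getD (slen a) 0)).head? =
          (avail skip ((i, a) :: rest) (slen a)).head? := by rw [Hinv (slen a)]
      rw [List.head?_drop] at hhd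
      constructor
      · rintro ⟨hlt, hget⟩
        rw [List.getElem?_eq_getElem hlt] at hhd
        rw [List.getD_eq_getElem _ 0 hlt] at hget
        by_contra hc
        have hc' : skip.contains i = true := by simpa using hc
        have hmem : i ∈ skip := (PySem.Set.contains_iff skip i).mp hc'
        rw [avail_cons] at hhd
        rw [if_neg (by simp [hmem])] at hhd
        have : i ∈ avail skip rest (slen a) := by
          rw [hget] at hhd
          exact List.mem_of_mem_head? (hhd ▸ Option.mem_def.mpr rfl)
        rcases (mem_avail _ _ _ _).mp this with ⟨p, hp, hp1, -⟩
        have := hi_lt p hp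
        omega
      · intro hc
        rw [avail_cons, if_pos ⟨hc, rfl⟩] at hhd
        simp only [List.head?_cons] at hhd
        rcases List.getElem?_eq_some_iff.mp hhd with ⟨hlt, hget⟩
        exact ⟨hlt, by rw [List.getD_eq_getElem _ 0 hlt, hget]⟩
    by_cases hskip : skip.contains i = true
    · -- i was already consumed: both sides skip it
      have hmem : i ∈ skip := (PySem.Set.contains_iff skip i).mp hskip
      have hnB : ¬ (ptr.getD (slen a) 0 < (buckets.getD (slen a) []).length ∧
          (buckets.getD (slen a) []).getD (ptr.getD (slen a) 0) 0 = i) := by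
        rw [hBcond]; simp [hmem]
      have hInv' : ∀ L, (buckets.getD L []).drop (ptr.getD L 0) = avail skip rest L := by
        intro L
        rw [Hinv L, avail_cons, if_neg (by simp [hmem])]
      simp only [mergeLoopA, mergeLoopB, hskip, if_true, if_neg hnB]
      exact ih _ _ _ _ Hget' hpw' hInv'
    · have hskip' : skip.contains i = false := by simpa using hskip
      have hB : ptr.getD (slen a) 0 < (buckets.getD (slen a) []).length ∧
          (buckets.getD (slen a) []).getD (ptr.getD (slen a) 0) 0 = i := hBcond.mpr hskip'
      have hInv2 : ∀ L, (buckets.getD L []).drop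
          ((ptr.insert (slen a) (ptr.getD (slen a) 0 + 1)).getD L 0) = avail skip rest L := by
        intro L
        rw [PySem.Dict.getD_insert]
        by_cases hL : L = slen a
        · subst hL
          rw [if_pos rfl, ← List.tail_drop, Hinv (slen a), avail_cons, if_pos ⟨hskip', rfl⟩]
          rfl
        · rw [if_neg hL, Hinv L, avail_cons, if_neg (by rintro ⟨-, h⟩; exact hL h.symm)]
      simp only [mergeLoopA, mergeLoopB, hskip', Bool.false_eq_true, if_false, if_pos hB]
      rw [findSim_eq_find]
      cases hFA : rest.find? (fun p => !(skip.contains p.1) && decide ((slen a - slen p.2).natAbs ≤ 2)) with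
      | none =>
        have hq : bucketQuery buckets (ptr.insert (slen a) (ptr.getD (slen a) 0 + 1)) (slen a) = none := by
          rw [bucketQuery_eq_foldl]
          apply fold_none
          intro L hL
          rcases PySem.List.mem_pyRange_one.mp hL with ⟨hL1, hL2⟩
          have hnil : avail skip rest L = [] := by
            rw [List.eq_nil_iff_forall_not_mem]
            intro c hc
            rcases (mem_avail _ _ _ _).mp hc with ⟨p, hp, -, hcont, hlen⟩
            refine List.find?_eq_none.mp hFA p hp ?_
            simp only [hcont, hlen, Bool.not_false, Bool.true_and, decide_eq_true_eq]
            omega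
          unfold semCand
          rw [hInv2 L, hnil]
          rfl
        rw [hq]
        dsimp only
        exact ih _ _ _ _ Hget' hpw' hInv2
      | some x =>
        obtain ⟨j, b⟩ := x
        have hxmem : (j, b) ∈ rest := List.mem_of_find?_eq_some hFA
        have hPx := List.find?_some hFA
        simp only [Bool.and_eq_true, Bool.not_eq_true', decide_eq_true_eq] at hPx
        obtain ⟨hcj, habs⟩ := hPx
        have hLbmem : slen b ∈ PySem.List.pyRange (slen a - 2) (slen a + 3) 1 :=
          PySem.List.mem_pyRange_one.mpr ⟨by omega, by omega⟩
        have hsem : ∀ L, semCand buckets (ptr.insert (slen a) (ptr.getD (slen a) 0 + 1)) L =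
            (avail skip rest L).head? := by
          intro L; unfold semCand; rw [hInv2 L]
        have hstr : rest.find? (fun p => !(skip.contains p.1) && (slen p.2 == slen b)) = some (j, b) := by
          refine find?_strengthen rest _ _ _ hFA ?_ ?_
          · simp only [Bool.and_eq_true, Bool.not_eq_true', beq_iff_eq]
            exact ⟨hcj, trivial⟩
          intro p hp
          simp only [Bool.and_eq_true, Bool.not_eq_true', beq_iff_eq, decide_eq_true_eq] at hp ⊢
          exact ⟨hp.1, by rw [hp.2]; omega⟩
        have hcandLb : semCand buckets (ptr.insert (slen a) (ptr.getD (slen a) 0 + 1)) (slen b) = some j := by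
          rw [hsem, avail, List.head?_map, List.head?_filter, hstr]
          rfl
        have hmin : ∀ L ∈ PySem.List.pyRange (slen a - 2) (slen a + 3) 1, ∀ c,
            semCand buckets (ptr.insert (slen a) (ptr.getD (slen a) 0 + 1)) L = some c →
            j ≤ c ∧ (c = j → L = slen b) := by
          intro L hL c hc
          rcases PySem.List.mem_pyRange_one.mp hL with ⟨hL1, hL2⟩
          rw [hsem] at hc
          have hcmem : c ∈ avail skip rest L := List.mem_of_mem_head? (hc ▸ Option.mem_def.mpr rfl)
          rcases (mem_avail _ _ _ _).mp hcmem with ⟨p, hp, hp1, hcont, hlen⟩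
          have hPp : (fun p => !(skip.contains p.1) && decide ((slen a - slen p.2).natAbs ≤ 2)) p = true := by
            simp only [hcont, hlen, Bool.not_false, Bool.true_and, decide_eq_true_eq]
            omega
          refine ⟨hp1 ▸ find?_min rest hpw' _ _ hFA p hp hPp, fun hcjq => ?_⟩
          have hpx : p = (j, b) := pairwise_fst_inj rest hpw' p hp (j, b) hxmem (by rw [hp1, hcjq])
          rw [← hlen, hpx]
        have hq : bucketQuery buckets (ptr.insert (slen a) (ptr.getD (slen a) 0 + 1)) (slen a) =
            some (j, slen b) := by
          rw [bucketQuery_eq_foldl]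
          exact fold_sel _ _ _ _ _ hcandLb hmin none (Or.inl ⟨Or.inl rfl, hLbmem⟩)
        rw [hq]
        dsimp only
        have hval : PySem.List.pyGetD items j "" = b := Hget (j, b) (List.mem_cons_of_mem _ hxmem)
        have hInv3 : ∀ L, (buckets.getD L []).drop
            (((ptr.insert (slen a) (ptr.getD (slen a) 0 + 1)).insert (slen b)
              ((ptr.insert (slen a) (ptr.getD (slen a) 0 + 1)).getD (slen b) 0 + 1)).getD L 0) =
            avail ((skip.add i).add j) rest L := by
          intro L
          rw [avail_add_add skip i j rest L hi_lt, PySem.Dict.getD_insert]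
          by_cases hL : L = slen b
          · subst hL
            rw [if_pos rfl, ← List.tail_drop, hInv2 (slen b)]
            have hhead : (avail skip rest (slen b)).head? = some j := by
              rw [← hsem]; exact hcandLb
            cases hav : avail skip rest (slen b) with
            | nil => rw [hav] at hhead; simp at hhead
            | cons c t =>
              rw [hav] at hhead
              simp only [List.head?_cons, Option.some.injEq] at hhead
              have hpt : (c :: t).Pairwise (· < ·) := hav ▸ avail_pairwise skip rest (slen b) hpw'
              have hcx : ∀ x ∈ t, c < x := (List.pairwise_cons.mp hpt).1
              rw [List.tail_cons, List.filter_cons, hhead]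
              simp only [beq_self_eq_true, Bool.not_true, Bool.false_eq_true, if_false]
              refine (List.filter_eq_self.mpr (fun x hx => ?_)).symm
              have hjx := hcx x hx
              rw [hhead] at hjx
              simp only [Bool.not_eq_true', beq_eq_false_iff_ne, ne_eq]
              omega
          · rw [if_neg hL, hInv2 L]
            refine (List.filter_eq_self.mpr ?_).symm
            intro c hc
            rcases (mem_avail _ _ _ _).mp hc with ⟨p, hp, hp1, -, hlen⟩
            have : c ≠ j := by
              intro hcj'
              have hpx : p = (j, b) := pairwise_fst_inj rest hpw' p hp (j, b) hxmem (by rw [hp1, hcj'])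
              rw [hpx] at hlen
              exact hL (by rw [← hlen])
            simpa using this
        rw [hval]
        exact ih _ _ _ _ Hget' hpw' hInv3

theorem initPtr_aux (ks : List Int) (d : PySem.Dict Int Nat) (h : ∀ L, d.getD L 0 = 0) (L : Int) :
    (ks.foldl (fun d L => d.insert L 0) d).getD L 0 = 0 := by
  induction ks generalizing d with
  | nil => exact h L
  | cons k ks ih =>
    refine ih _ (fun L' => ?_)
    rw [PySem.Dict.getD_insert]
    split <;> simp [h]

theorem initPtr_getD (buckets : PySem.Dict Int (List Int)) (L : Int) :
    (initPtr buckets).getD L 0 = 0 := by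
  exact initPtr_aux _ _ (fun L' => by simp [PySem.Dict.getD_empty]) L

theorem enumerate_map (f : String → Int) (xs : List String) (s : Int) :
    PySem.List.enumerate (xs.map f) s = (PySem.List.enumerate xs s).map (fun p => (p.1, f p.2)) := by
  induction xs generalizing s with
  | nil => simp [PySem.List.enumerate_nil]
  | cons x xs ih => simp [PySem.List.enumerate_cons, ih]

theorem buildBuckets_getD (items : List String) (L : Int) :
    (buildBuckets (items.map slen)).getD L [] = avail PySem.Set.empty (PySem.List.enumerate items 0) L := by
  unfold buildBuckets avail
  rw [enumerate_map]
  rw [show ((PySem.List.enumerate items 0).map (fun p => (p.1, slen p.2))).foldl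
        (fun d p => d.modify p.2 [] (· ++ [p.1])) PySem.Dict.empty
      = ((PySem.List.enumerate items 0).map (fun p => (slen p.2, p.1))).foldl
        (fun d p => d.modify p.1 [] (· ++ [p.2])) PySem.Dict.empty by
    rw [List.foldl_map, List.foldl_map]]
  rw [PySem.Dict.getD_foldl_modify_append]
  simp [List.filter_map, Function.comp_def, PySem.Dict.getD_empty]

theorem pass_eq (items : List String) :
    mergeLoopA (PySem.List.enumerate items 0) [] PySem.Set.empty = mergePass items := by
  unfold mergePass
  refine loop_eq items _ _ _ _ _ ?_ ?_ ?_
  · intro p hp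
    rcases (PySem.List.mem_enumerate_iff items 0 p).mp hp with ⟨k, hk, rfl⟩
    simp only [zero_add, PySem.List.pyGetD_natCast]
    exact List.getD_eq_getElem _ _ hk
  · exact PySem.List.pairwise_lt_enumerate items 0
  · intro L
    rw [initPtr_getD, List.drop_zero, buildBuckets_getD]

theorem recurse_eq (items : List String) (depth : Int) :
    recurse items depth = recurse_alt items depth := by
  induction items, depth using recurse.induct with
  | case1 items depth h => rw [recurse, recurse_alt, if_pos h, if_pos h]
  | case2 items depth h merged hne ih =>
    rw [recurse, recurse_alt, if_neg h, if_neg h]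
    dsimp only
    have hne' : mergePass items ≠ items := by rw [← pass_eq items]; exact hne
    rw [pass_eq items, if_pos hne', if_pos hne', ← pass_eq items]
    exact ih
  | case3 items depth h merged hne =>
    rw [recurse, recurse_alt, if_neg h, if_neg h]
    dsimp only
    have hne' : ¬ mergePass items ≠ items := by rw [← pass_eq items]; exact hne
    rw [pass_eq items, if_neg hne', if_neg hne']

-- ===== VERDICT (by name: the statement is the Claim_ definition above) =====
theorem recurse_spec : Claim_equal_recurse := by
  intro items depth _
  unfold Spec_recurse
  exact recurse_eq items depth
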